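-- pv_equiv track=rewrite | github.com/fatihtk/lblock-vs-present | lblock.py | function_F_lblock
-- ===== SOURCE A (Python) =====
-- SBOX_LBLOCK = [
--     # S0           # S1           # S2           # S3
--     [0x2, 0xa, 0xc, 0x6, 0x9, 0x0, 0x1, 0xb, 0x7, 0xd, 0x5, 0xf, 0xe, 0x4, 0x3, 0x8],
--     [0xa, 0x1, 0x4, 0xc, 0x6, 0xd, 0xf, 0x7, 0x0, 0x9, 0x5, 0xe, 0x3, 0xb, 0x8, 0x2],
--     [0x8, 0xc, 0x6, 0x7, 0x9, 0x3, 0xa, 0xf, 0x5, 0x1, 0xe, 0x4, 0xb, 0x0, 0xd, 0x2],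
--     [0x4, 0x6, 0x2, 0x9, 0x1, 0xd, 0xb, 0xe, 0x5, 0xf, 0xc, 0x7, 0xa, 0x0, 0x8, 0x3],
--     # S4           # S5           # S6           # S7
--     [0xb, 0x7, 0x5, 0xd, 0xf, 0x0, 0x9, 0xe, 0xa, 0x3, 0xc, 0x4, 0x8, 0x6, 0x1, 0x2],
--     [0xd, 0x8, 0xb, 0x4, 0xc, 0xf, 0x3, 0x9, 0x7, 0x0, 0xa, 0xe, 0x2, 0x6, 0x1, 0x5],
--     [0xf, 0x1, 0x8, 0xd, 0x6, 0xb, 0x3, 0x4, 0x9, 0x7, 0x2, 0xa, 0xc, 0x0, 0xe, 0x5],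
--     [0xa, 0xf, 0x6, 0x3, 0x9, 0xd, 0x1, 0x4, 0xc, 0xe, 0x0, 0x7, 0x5, 0x2, 0xb, 0x8]
-- ]
--
-- P_PERM_LBLOCK = [
--     # i=0 -> j=24, i=1 -> j=16, ...
--     24, 16,  8,  0, 25, 17,  9,  1, 26, 18, 10,  2, 27, 19, 11,  3,
--     28, 20, 12,  4, 29, 21, 13,  5, 30, 22, 14,  6, 31, 23, 15,  7
-- ]
--
-- def function_F_lblock(r_half, round_key):
--     """LBlock F fonksiyonu (32-bit giriş/anahtar, 32-bit çıkış)."""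
--     temp = r_half ^ round_key # 1. Anahtar ile XOR
--     s_output = 0
--     # 2. S-Box Katmanı
--     # 8 adet 4-bitlik bloğa 8 farklı S-Box uygulanır.
--     # S7 -> en anlamlı (sol) 4-bit (bit 31..28)
--     # S0 -> en anlamsız (sağ) 4-bit (bit 3..0)
--     for i in range(8):
--         # Sağdan i. 4-bitlik nibble'ı al (i=0 -> bit 3..0, i=7 -> bit 31..28)
--         start_bit = i * 4
--         nibble = (temp >> start_bit) & 0xF
--         # İlgili S-Box'ı kullan (S0'dan S7'ye doğru)
--         s_out = SBOX_LBLOCK[i][nibble]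
--         s_output |= (s_out << start_bit)
--
--     # 3. P-Permütasyon Katmanı
--     p_output = 0
--     for i in range(32):
--         if (s_output >> i) & 1: # Eğer s_output'un i. biti 1 ise
--             # Çıkışın P_PERM_LBLOCK[i]. bitini 1 yap
--             p_output |= (1 << P_PERM_LBLOCK[i])
--     return p_output
-- ===== SOURCE B (Python) =====
-- SBOX_LBLOCK = [
--     [0x2, 0xa, 0xc, 0x6, 0x9, 0x0, 0x1, 0xb, 0x7, 0xd, 0x5, 0xf, 0xe, 0x4, 0x3, 0x8],
--     [0xa, 0x1, 0x4, 0xc, 0x6, 0xd, 0xf, 0x7, 0x0, 0x9, 0x5, 0xe, 0x3, 0xb, 0x8, 0x2],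
--     [0x8, 0xc, 0x6, 0x7, 0x9, 0x3, 0xa, 0xf, 0x5, 0x1, 0xe, 0x4, 0xb, 0x0, 0xd, 0x2],
--     [0x4, 0x6, 0x2, 0x9, 0x1, 0xd, 0xb, 0xe, 0x5, 0xf, 0xc, 0x7, 0xa, 0x0, 0x8, 0x3],
--     [0xb, 0x7, 0x5, 0xd, 0xf, 0x0, 0x9, 0xe, 0xa, 0x3, 0xc, 0x4, 0x8, 0x6, 0x1, 0x2],
--     [0xd, 0x8, 0xb, 0x4, 0xc, 0xf, 0x3, 0x9, 0x7, 0x0, 0xa, 0xe, 0x2, 0x6, 0x1, 0x5],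
--     [0xf, 0x1, 0x8, 0xd, 0x6, 0xb, 0x3, 0x4, 0x9, 0x7, 0x2, 0xa, 0xc, 0x0, 0xe, 0x5],
--     [0xa, 0xf, 0x6, 0x3, 0x9, 0xd, 0x1, 0x4, 0xc, 0xe, 0x0, 0x7, 0x5, 0x2, 0xb, 0x8]
-- ]
--
-- P_PERM_LBLOCK = [
--     24, 16,  8,  0, 25, 17,  9,  1, 26, 18, 10,  2, 27, 19, 11,  3,
--     28, 20, 12,  4, 29, 21, 13,  5, 30, 22, 14,  6, 31, 23, 15,  7
-- ]
--
-- # T-tables, built once at module load: substitution and bit permutation fused into one lookup.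
-- _PT = [
--     [
--         sum(1 << P_PERM_LBLOCK[4 * i + b]
--             for b in range(4) if (SBOX_LBLOCK[i][v] >> b) & 1)
--         for v in range(16)
--     ]
--     for i in range(8)
-- ]
--
-- def function_F_lblock(r_half, round_key):
--     """LBlock F function via fused S-box/permutation T-tables: one 8-step loop."""
--     temp = r_half ^ round_key
--     out = 0
--     for i in range(8):
--         out |= _PT[i][(temp >> (4 * i)) & 0xF]
--     return out
-- ===== Notes on version B (the rewrite author's own statement) =====
-- stated objective: alternative
-- what changed: A's separate 8-step S-box loop plus 32-step per-bit permutation scatter loop are replaced by eight 16-entry T-tables precomputed at module load that fuse substitution and permutation, so the function body is a single 8-iteration table-lookup loop.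
import Mathlib
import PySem

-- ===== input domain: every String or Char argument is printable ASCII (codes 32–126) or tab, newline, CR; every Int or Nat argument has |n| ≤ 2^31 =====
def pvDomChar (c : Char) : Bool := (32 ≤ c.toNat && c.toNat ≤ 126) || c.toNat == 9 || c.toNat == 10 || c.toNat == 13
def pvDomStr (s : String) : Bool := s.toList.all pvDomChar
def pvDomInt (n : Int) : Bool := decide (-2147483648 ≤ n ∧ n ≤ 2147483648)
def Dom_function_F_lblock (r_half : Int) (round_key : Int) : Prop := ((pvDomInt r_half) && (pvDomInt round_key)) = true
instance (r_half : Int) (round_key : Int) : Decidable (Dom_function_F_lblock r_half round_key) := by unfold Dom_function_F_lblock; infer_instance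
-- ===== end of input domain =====

-- B fuses the S-box and bit-permutation layers into eight precomputed 16-entry T-tables,
-- replacing A's 8-step substitution loop plus 32-step bit-scatter loop by a single 8-step
-- lookup loop (objective: alternative T-table decomposition; same return value on all inputs).

-- ===== PORT A =====
def sboxLBlock : List (List Int) := [
  [2, 10, 12, 6, 9, 0, 1, 11, 7, 13, 5, 15, 14, 4, 3, 8],
  [10, 1, 4, 12, 6, 13, 15, 7, 0, 9, 5, 14, 3, 11, 8, 2],
  [8, 12, 6, 7, 9, 3, 10, 15, 5, 1, 14, 4, 11, 0, 13, 2],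
  [4, 6, 2, 9, 1, 13, 11, 14, 5, 15, 12, 7, 10, 0, 8, 3],
  [11, 7, 5, 13, 15, 0, 9, 14, 10, 3, 12, 4, 8, 6, 1, 2],
  [13, 8, 11, 4, 12, 15, 3, 9, 7, 0, 10, 14, 2, 6, 1, 5],
  [15, 1, 8, 13, 6, 11, 3, 4, 9, 7, 2, 10, 12, 0, 14, 5],
  [10, 15, 6, 3, 9, 13, 1, 4, 12, 14, 0, 7, 5, 2, 11, 8]]

def pPermLBlock : List Int := [24, 16, 8, 0, 25, 17, 9, 1, 26, 18, 10, 2, 27, 19, 11, 3, 28, 20, 12, 4, 29, 21, 13, 5, 30, 22, 14, 6, 31, 23, 15, 7]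

-- Transliteration of A. All list indexing is in range (row i < 8, nibble = x & 0xF < 16,
-- i < 32 = len(P_PERM_LBLOCK)), so pyGetD's default is never reached; the .toNat on the
-- permutation entry (a shift amount) is exact since all entries are nonnegative literals.
def function_F_lblock (r_half : Int) (round_key : Int) : Int :=
  let temp := PySem.Int.bxor r_half round_key
  let s_output := (List.range 8).foldl (fun (s : Int) (i : Nat) =>
    let nibble := PySem.Int.band (temp >>> (i * 4)) 0xF
    let s_out := PySem.List.pyGetD (PySem.List.pyGetD sboxLBlock (i : Int) []) nibble 0
    PySem.Int.bor s (s_out <<< (i * 4))) 0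
  (List.range 32).foldl (fun (p : Int) (i : Nat) =>
    if PySem.Int.band (s_output >>> i) 1 ≠ 0 then
      PySem.Int.bor p ((1 : Int) <<< (PySem.List.pyGetD pPermLBlock (i : Int) 0).toNat)
    else p) 0

-- ===== PORT B =====
-- Source B's module-load comprehension building the fused T-tables, transliterated.
def ptLBlock : List (List Int) :=
  (List.range 8).map (fun (i : Nat) =>
    (List.range 16).map (fun (v : Nat) =>
      (((List.range 4).filter (fun (b : Nat) =>
          PySem.Int.band ((PySem.List.pyGetD (PySem.List.pyGetD sboxLBlock (i : Int) []) (v : Int) 0) >>> b) 1 != 0)).map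
        (fun (b : Nat) => (1 : Int) <<< (PySem.List.pyGetD pPermLBlock ((4 * i + b : Nat) : Int) 0).toNat)).sum))

def function_F_lblock_alt (r_half : Int) (round_key : Int) : Int :=
  let temp := PySem.Int.bxor r_half round_key
  (List.range 8).foldl (fun (out : Int) (i : Nat) =>
    PySem.Int.bor out (PySem.List.pyGetD (PySem.List.pyGetD ptLBlock (i : Int) [])
      (PySem.Int.band (temp >>> (4 * i)) 0xF) 0)) 0

-- ===== PRECONDITION & SPEC =====
def Spec_function_F_lblock (r_half : Int) (round_key : Int) (out : Int) : Prop := out = function_F_lblock_alt r_half round_key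
instance (r_half : Int) (round_key : Int) (out : Int) : Decidable (Spec_function_F_lblock r_half round_key out) := by unfold Spec_function_F_lblock; infer_instance

-- ===== CLAIM (what is proved, stated in full; the proofs are below) =====
def Claim_equal_function_F_lblock : Prop := ∀ (r_half : Int) (round_key : Int), Dom_function_F_lblock r_half round_key → Spec_function_F_lblock r_half round_key (function_F_lblock r_half round_key)

-- ===== LEMMAS AND PROOFS =====

-- Nat-side models of the two computations (proof machinery only).
def rowsN : List (List Nat) := [
  [2, 10, 12, 6, 9, 0, 1, 11, 7, 13, 5, 15, 14, 4, 3, 8],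
  [10, 1, 4, 12, 6, 13, 15, 7, 0, 9, 5, 14, 3, 11, 8, 2],
  [8, 12, 6, 7, 9, 3, 10, 15, 5, 1, 14, 4, 11, 0, 13, 2],
  [4, 6, 2, 9, 1, 13, 11, 14, 5, 15, 12, 7, 10, 0, 8, 3],
  [11, 7, 5, 13, 15, 0, 9, 14, 10, 3, 12, 4, 8, 6, 1, 2],
  [13, 8, 11, 4, 12, 15, 3, 9, 7, 0, 10, 14, 2, 6, 1, 5],
  [15, 1, 8, 13, 6, 11, 3, 4, 9, 7, 2, 10, 12, 0, 14, 5],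
  [10, 15, 6, 3, 9, 13, 1, 4, 12, 14, 0, 7, 5, 2, 11, 8]]

def ptN : List (List Nat) := [
  [65536, 65537, 257, 65792, 16777217, 0, 16777216, 16842753, 16843008, 16777473, 16777472, 16843009, 65793, 256, 16842752, 1],
  [131074, 33554432, 512, 514, 131584, 33554946, 33686018, 33686016, 0, 33554434, 33554944, 131586, 33685504, 33685506, 2, 131072],
  [4, 1028, 263168, 67372032, 67108868, 67371008, 262148, 67372036, 67109888, 67108864, 263172, 1024, 67371012, 0, 67109892, 262144],
  [2048, 526336, 524288, 134217736, 134217728, 134219784, 134742024, 526344, 134219776, 134744072, 2056, 134744064, 524296, 0, 8, 134742016],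
  [269484048, 269488128, 268439552, 268439568, 269488144, 0, 268435472, 1052688, 1048592, 269484032, 4112, 4096, 16, 1052672, 268435456, 1048576],
  [536879136, 32, 538968096, 8192, 8224, 538976288, 538968064, 536870944, 538976256, 0, 2097184, 2105376, 2097152, 2105344, 536870912, 536879104],
  [1077952576, 1073741824, 64, 1073758272, 4210688, 1077936192, 1077936128, 16384, 1073741888, 1077952512, 4194304, 4194368, 16448, 0, 4210752, 1073758208],
  [8388736, 2155905152, 8421376, 2155872256, 2147483776, 2147516544, 2147483648, 32768, 32896, 8421504, 0, 2155905024, 2147516416, 8388608, 2155872384, 128]]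

def permN : List Nat := [24, 16, 8, 0, 25, 17, 9, 1, 26, 18, 10, 2, 27, 19, 11, 3, 28, 20, 12, 4, 29, 21, 13, 5, 30, 22, 14, 6, 31, 23, 15, 7]

def nibN (t : Int) (i : Nat) : Nat := (PySem.Int.band (t >>> (i * 4)) 15).toNat

def wN (t : Int) (i : Nat) : Nat := (rowsN.getD i []).getD (nibN t i) 0

def sN (t : Int) : Nat := (List.range 8).foldl (fun s i => s ||| (wN t i <<< (i * 4))) 0

def pN (t : Int) : Nat := (List.range 32).foldl
  (fun p k => p ||| (if (sN t).testBit k then 1 <<< permN.getD k 0 else 0)) 0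

def bN (t : Int) : Nat := (List.range 8).foldl
  (fun p i => p ||| (ptN.getD i []).getD (nibN t i) 0) 0

theorem rng8 : List.range 8 = [0, 1, 2, 3, 4, 5, 6, 7] := by decide

theorem band15_bounds (a : Int) : 0 ≤ PySem.Int.band a 15 ∧ PySem.Int.band a 15 < 16 := by
  unfold PySem.Int.band
  have h1 : a.toNat &&& 15 ≤ 15 := Nat.and_le_right
  split_ifs <;> push_cast [show (15 : Int).toNat = 15 from rfl] <;> omega

theorem nib_cast (t : Int) (i : Nat) :
    PySem.Int.band (t >>> (i * 4)) 15 = ((nibN t i : Nat) : Int) :=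
  (Int.toNat_of_nonneg (band15_bounds _).1).symm

theorem nib_lt (t : Int) (i : Nat) : nibN t i < 16 := by
  have h := band15_bounds (t >>> (i * 4))
  unfold nibN
  omega

theorem getD_map_cast (l : List Nat) (n : Nat) :
    (l.map (fun x : Nat => (x : Int))).getD n 0 = ((l.getD n 0 : Nat) : Int) := by
  induction l generalizing n with
  | nil => simp
  | cons a l ih => cases n with
    | zero => simp
    | succ n => simpa using ih n

theorem getD_map_map (L : List (List Nat)) (i : Nat) :
    (L.map (fun r => r.map (fun x : Nat => (x : Int)))).getD i [] = (L.getD i []).map (fun x : Nat => (x : Int)) := by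
  induction L generalizing i with
  | nil => simp
  | cons r L ih => cases i with
    | zero => simp
    | succ i => simpa using ih i

theorem sbox_cast : sboxLBlock = rowsN.map (fun r => r.map (fun x : Nat => (x : Int))) := by rfl

theorem perm_cast : pPermLBlock = permN.map (fun x : Nat => (x : Int)) := by rfl

theorem pt_cast : ptLBlock = ptN.map (fun r => r.map (fun x : Nat => (x : Int))) := by decide

theorem band_one_cast (m : Nat) (k : Nat) : (PySem.Int.band ((m : Int) >>> k) 1 ≠ 0) ↔ m.testBit k := by
  rw [← Int.natCast_shiftRight, show (1 : Int) = ((1 : Nat) : Int) from rfl, PySem.Int.band_natCast,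
    Ne, Nat.cast_eq_zero]
  simp [Nat.testBit, Nat.and_one_is_mod, Nat.one_and_eq_mod_two]

theorem w_lt (t : Int) (i : Nat) : wN t i < 16 := by
  have hall : ∀ r ∈ rowsN, ∀ x ∈ r, x < 16 := by decide
  have hrow : ∀ x ∈ rowsN.getD i [], x < 16 := by
    by_cases hi : i < rowsN.length
    · rw [List.getD_eq_getElem _ _ hi]
      exact hall _ (List.getElem_mem hi)
    · rw [List.getD_eq_default _ _ (by omega)]
      simp
  unfold wN
  rcases h : (rowsN.getD i [])[nibN t i]? with _ | x
  · rw [List.getD_eq_getElem?_getD, h]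
    simp
  · rw [List.getD_eq_getElem?_getD, h]
    exact hrow x (List.mem_of_getElem? h)

theorem lor4 (p a b c d : Nat) : p ||| a ||| b ||| c ||| d = p ||| (a ||| b ||| c ||| d) := by
  simp [Nat.lor_assoc]

theorem chunkv0 : ∀ u : Fin 16,
    (if ((rowsN.getD 0 []).getD (u : Nat) 0).testBit 0 then 1 <<< permN.getD 0 0 else 0) ||| (if ((rowsN.getD 0 []).getD (u : Nat) 0).testBit 1 then 1 <<< permN.getD 1 0 else 0) ||| (if ((rowsN.getD 0 []).getD (u : Nat) 0).testBit 2 then 1 <<< permN.getD 2 0 else 0) ||| (if ((rowsN.getD 0 []).getD (u : Nat) 0).testBit 3 then 1 <<< permN.getD 3 0 else 0)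
    = (ptN.getD 0 []).getD (u : Nat) 0 := by decide

theorem chunkv1 : ∀ u : Fin 16,
    (if ((rowsN.getD 1 []).getD (u : Nat) 0).testBit 0 then 1 <<< permN.getD 4 0 else 0) ||| (if ((rowsN.getD 1 []).getD (u : Nat) 0).testBit 1 then 1 <<< permN.getD 5 0 else 0) ||| (if ((rowsN.getD 1 []).getD (u : Nat) 0).testBit 2 then 1 <<< permN.getD 6 0 else 0) ||| (if ((rowsN.getD 1 []).getD (u : Nat) 0).testBit 3 then 1 <<< permN.getD 7 0 else 0)
    = (ptN.getD 1 []).getD (u : Nat) 0 := by decide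

theorem chunkv2 : ∀ u : Fin 16,
    (if ((rowsN.getD 2 []).getD (u : Nat) 0).testBit 0 then 1 <<< permN.getD 8 0 else 0) ||| (if ((rowsN.getD 2 []).getD (u : Nat) 0).testBit 1 then 1 <<< permN.getD 9 0 else 0) ||| (if ((rowsN.getD 2 []).getD (u : Nat) 0).testBit 2 then 1 <<< permN.getD 10 0 else 0) ||| (if ((rowsN.getD 2 []).getD (u : Nat) 0).testBit 3 then 1 <<< permN.getD 11 0 else 0)
    = (ptN.getD 2 []).getD (u : Nat) 0 := by decide

theorem chunkv3 : ∀ u : Fin 16,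
    (if ((rowsN.getD 3 []).getD (u : Nat) 0).testBit 0 then 1 <<< permN.getD 12 0 else 0) ||| (if ((rowsN.getD 3 []).getD (u : Nat) 0).testBit 1 then 1 <<< permN.getD 13 0 else 0) ||| (if ((rowsN.getD 3 []).getD (u : Nat) 0).testBit 2 then 1 <<< permN.getD 14 0 else 0) ||| (if ((rowsN.getD 3 []).getD (u : Nat) 0).testBit 3 then 1 <<< permN.getD 15 0 else 0)
    = (ptN.getD 3 []).getD (u : Nat) 0 := by decide

theorem chunkv4 : ∀ u : Fin 16,
    (if ((rowsN.getD 4 []).getD (u : Nat) 0).testBit 0 then 1 <<< permN.getD 16 0 else 0) ||| (if ((rowsN.getD 4 []).getD (u : Nat) 0).testBit 1 then 1 <<< permN.getD 17 0 else 0) ||| (if ((rowsN.getD 4 []).getD (u : Nat) 0).testBit 2 then 1 <<< permN.getD 18 0 else 0) ||| (if ((rowsN.getD 4 []).getD (u : Nat) 0).testBit 3 then 1 <<< permN.getD 19 0 else 0)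
    = (ptN.getD 4 []).getD (u : Nat) 0 := by decide

theorem chunkv5 : ∀ u : Fin 16,
    (if ((rowsN.getD 5 []).getD (u : Nat) 0).testBit 0 then 1 <<< permN.getD 20 0 else 0) ||| (if ((rowsN.getD 5 []).getD (u : Nat) 0).testBit 1 then 1 <<< permN.getD 21 0 else 0) ||| (if ((rowsN.getD 5 []).getD (u : Nat) 0).testBit 2 then 1 <<< permN.getD 22 0 else 0) ||| (if ((rowsN.getD 5 []).getD (u : Nat) 0).testBit 3 then 1 <<< permN.getD 23 0 else 0)
    = (ptN.getD 5 []).getD (u : Nat) 0 := by decide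

theorem chunkv6 : ∀ u : Fin 16,
    (if ((rowsN.getD 6 []).getD (u : Nat) 0).testBit 0 then 1 <<< permN.getD 24 0 else 0) ||| (if ((rowsN.getD 6 []).getD (u : Nat) 0).testBit 1 then 1 <<< permN.getD 25 0 else 0) ||| (if ((rowsN.getD 6 []).getD (u : Nat) 0).testBit 2 then 1 <<< permN.getD 26 0 else 0) ||| (if ((rowsN.getD 6 []).getD (u : Nat) 0).testBit 3 then 1 <<< permN.getD 27 0 else 0)
    = (ptN.getD 6 []).getD (u : Nat) 0 := by decide

theorem chunkv7 : ∀ u : Fin 16,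
    (if ((rowsN.getD 7 []).getD (u : Nat) 0).testBit 0 then 1 <<< permN.getD 28 0 else 0) ||| (if ((rowsN.getD 7 []).getD (u : Nat) 0).testBit 1 then 1 <<< permN.getD 29 0 else 0) ||| (if ((rowsN.getD 7 []).getD (u : Nat) 0).testBit 2 then 1 <<< permN.getD 30 0 else 0) ||| (if ((rowsN.getD 7 []).getD (u : Nat) 0).testBit 3 then 1 <<< permN.getD 31 0 else 0)
    = (ptN.getD 7 []).getD (u : Nat) 0 := by decide

theorem chunk0 (t : Int) (p : Nat) :
    p ||| (if (wN t 0).testBit 0 then 1 <<< permN.getD 0 0 else 0) ||| (if (wN t 0).testBit 1 then 1 <<< permN.getD 1 0 else 0) ||| (if (wN t 0).testBit 2 then 1 <<< permN.getD 2 0 else 0) ||| (if (wN t 0).testBit 3 then 1 <<< permN.getD 3 0 else 0)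
    = p ||| (ptN.getD 0 []).getD (nibN t 0) 0 := by
  rw [lor4]
  exact congrArg (p ||| ·) (chunkv0 ⟨nibN t 0, nib_lt t 0⟩)

theorem chunk1 (t : Int) (p : Nat) :
    p ||| (if (wN t 1).testBit 0 then 1 <<< permN.getD 4 0 else 0) ||| (if (wN t 1).testBit 1 then 1 <<< permN.getD 5 0 else 0) ||| (if (wN t 1).testBit 2 then 1 <<< permN.getD 6 0 else 0) ||| (if (wN t 1).testBit 3 then 1 <<< permN.getD 7 0 else 0)
    = p ||| (ptN.getD 1 []).getD (nibN t 1) 0 := by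
  rw [lor4]
  exact congrArg (p ||| ·) (chunkv1 ⟨nibN t 1, nib_lt t 1⟩)

theorem chunk2 (t : Int) (p : Nat) :
    p ||| (if (wN t 2).testBit 0 then 1 <<< permN.getD 8 0 else 0) ||| (if (wN t 2).testBit 1 then 1 <<< permN.getD 9 0 else 0) ||| (if (wN t 2).testBit 2 then 1 <<< permN.getD 10 0 else 0) ||| (if (wN t 2).testBit 3 then 1 <<< permN.getD 11 0 else 0)
    = p ||| (ptN.getD 2 []).getD (nibN t 2) 0 := by
  rw [lor4]
  exact congrArg (p ||| ·) (chunkv2 ⟨nibN t 2, nib_lt t 2⟩)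

theorem chunk3 (t : Int) (p : Nat) :
    p ||| (if (wN t 3).testBit 0 then 1 <<< permN.getD 12 0 else 0) ||| (if (wN t 3).testBit 1 then 1 <<< permN.getD 13 0 else 0) ||| (if (wN t 3).testBit 2 then 1 <<< permN.getD 14 0 else 0) ||| (if (wN t 3).testBit 3 then 1 <<< permN.getD 15 0 else 0)
    = p ||| (ptN.getD 3 []).getD (nibN t 3) 0 := by
  rw [lor4]
  exact congrArg (p ||| ·) (chunkv3 ⟨nibN t 3, nib_lt t 3⟩)

theorem chunk4 (t : Int) (p : Nat) :
    p ||| (if (wN t 4).testBit 0 then 1 <<< permN.getD 16 0 else 0) ||| (if (wN t 4).testBit 1 then 1 <<< permN.getD 17 0 else 0) ||| (if (wN t 4).testBit 2 then 1 <<< permN.getD 18 0 else 0) ||| (if (wN t 4).testBit 3 then 1 <<< permN.getD 19 0 else 0)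
    = p ||| (ptN.getD 4 []).getD (nibN t 4) 0 := by
  rw [lor4]
  exact congrArg (p ||| ·) (chunkv4 ⟨nibN t 4, nib_lt t 4⟩)

theorem chunk5 (t : Int) (p : Nat) :
    p ||| (if (wN t 5).testBit 0 then 1 <<< permN.getD 20 0 else 0) ||| (if (wN t 5).testBit 1 then 1 <<< permN.getD 21 0 else 0) ||| (if (wN t 5).testBit 2 then 1 <<< permN.getD 22 0 else 0) ||| (if (wN t 5).testBit 3 then 1 <<< permN.getD 23 0 else 0)
    = p ||| (ptN.getD 5 []).getD (nibN t 5) 0 := by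
  rw [lor4]
  exact congrArg (p ||| ·) (chunkv5 ⟨nibN t 5, nib_lt t 5⟩)

theorem chunk6 (t : Int) (p : Nat) :
    p ||| (if (wN t 6).testBit 0 then 1 <<< permN.getD 24 0 else 0) ||| (if (wN t 6).testBit 1 then 1 <<< permN.getD 25 0 else 0) ||| (if (wN t 6).testBit 2 then 1 <<< permN.getD 26 0 else 0) ||| (if (wN t 6).testBit 3 then 1 <<< permN.getD 27 0 else 0)
    = p ||| (ptN.getD 6 []).getD (nibN t 6) 0 := by
  rw [lor4]
  exact congrArg (p ||| ·) (chunkv6 ⟨nibN t 6, nib_lt t 6⟩)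

theorem chunk7 (t : Int) (p : Nat) :
    p ||| (if (wN t 7).testBit 0 then 1 <<< permN.getD 28 0 else 0) ||| (if (wN t 7).testBit 1 then 1 <<< permN.getD 29 0 else 0) ||| (if (wN t 7).testBit 2 then 1 <<< permN.getD 30 0 else 0) ||| (if (wN t 7).testBit 3 then 1 <<< permN.getD 31 0 else 0)
    = p ||| (ptN.getD 7 []).getD (nibN t 7) 0 := by
  rw [lor4]
  exact congrArg (p ||| ·) (chunkv7 ⟨nibN t 7, nib_lt t 7⟩)

theorem bridgeA (r_half round_key : Int) :
    function_F_lblock r_half round_key = ((pN (PySem.Int.bxor r_half round_key) : Nat) : Int) := by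
  unfold function_F_lblock
  dsimp only
  have hs : (List.range 8).foldl (fun (s : Int) (i : Nat) =>
      PySem.Int.bor s ((PySem.List.pyGetD (PySem.List.pyGetD sboxLBlock (i : Int) [])
        (PySem.Int.band (PySem.Int.bxor r_half round_key >>> (i * 4)) 0xF) 0) <<< (i * 4))) 0
      = ((sN (PySem.Int.bxor r_half round_key) : Nat) : Int) := by
    unfold sN
    refine List.foldl_hom (fun n : Nat => (n : Int)) ?_
    intro s i
    rw [nib_cast, sbox_cast]
    simp only [PySem.List.pyGetD_natCast, getD_map_map, getD_map_cast]
    rw [← Int.natCast_shiftLeft, PySem.Int.bor_natCast]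
    rfl
  rw [hs]
  unfold pN
  refine List.foldl_hom (fun n : Nat => (n : Int)) ?_
  intro p i
  by_cases hb : (sN (PySem.Int.bxor r_half round_key)).testBit i
  · rw [if_pos ((band_one_cast _ _).mpr hb), if_pos hb, perm_cast, PySem.List.pyGetD_natCast,
      getD_map_cast, Int.toNat_natCast, show (1 : Int) = ((1 : Nat) : Int) from rfl,
      ← Int.natCast_shiftLeft, PySem.Int.bor_natCast]
  · rw [if_neg (fun hc => hb ((band_one_cast _ _).mp hc)), if_neg hb, Nat.or_zero]

theorem bridgeB (r_half round_key : Int) :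
    function_F_lblock_alt r_half round_key = ((bN (PySem.Int.bxor r_half round_key) : Nat) : Int) := by
  unfold function_F_lblock_alt
  dsimp only
  unfold bN
  refine List.foldl_hom (fun n : Nat => (n : Int)) ?_
  intro p i
  rw [show 4 * i = i * 4 from Nat.mul_comm 4 i, nib_cast, pt_cast]
  simp only [PySem.List.pyGetD_natCast, getD_map_map, getD_map_cast]
  rw [PySem.Int.bor_natCast]

theorem core (t : Int) : pN t = bN t := by
  have htb : ∀ j b, 4 ≤ b → (wN t j).testBit b = false := fun j b hb =>
    Nat.testBit_lt_two_pow (lt_of_lt_of_le (w_lt t j)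
      (le_trans (by norm_num) (Nat.pow_le_pow_right (by norm_num) hb)))
  have h0 : (sN t).testBit 0 = (wN t 0).testBit 0 := by
    simp [sN, rng8]
  have h1 : (sN t).testBit 1 = (wN t 0).testBit 1 := by
    simp [sN, rng8]
  have h2 : (sN t).testBit 2 = (wN t 0).testBit 2 := by
    simp [sN, rng8]
  have h3 : (sN t).testBit 3 = (wN t 0).testBit 3 := by
    simp [sN, rng8]
  have h4 : (sN t).testBit 4 = (wN t 1).testBit 0 := by
    simp [sN, rng8, htb]
  have h5 : (sN t).testBit 5 = (wN t 1).testBit 1 := by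
    simp [sN, rng8, htb]
  have h6 : (sN t).testBit 6 = (wN t 1).testBit 2 := by
    simp [sN, rng8, htb]
  have h7 : (sN t).testBit 7 = (wN t 1).testBit 3 := by
    simp [sN, rng8, htb]
  have h8 : (sN t).testBit 8 = (wN t 2).testBit 0 := by
    simp [sN, rng8, htb]
  have h9 : (sN t).testBit 9 = (wN t 2).testBit 1 := by
    simp [sN, rng8, htb]
  have h10 : (sN t).testBit 10 = (wN t 2).testBit 2 := by
    simp [sN, rng8, htb]
  have h11 : (sN t).testBit 11 = (wN t 2).testBit 3 := by
    simp [sN, rng8, htb]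
  have h12 : (sN t).testBit 12 = (wN t 3).testBit 0 := by
    simp [sN, rng8, htb]
  have h13 : (sN t).testBit 13 = (wN t 3).testBit 1 := by
    simp [sN, rng8, htb]
  have h14 : (sN t).testBit 14 = (wN t 3).testBit 2 := by
    simp [sN, rng8, htb]
  have h15 : (sN t).testBit 15 = (wN t 3).testBit 3 := by
    simp [sN, rng8, htb]
  have h16 : (sN t).testBit 16 = (wN t 4).testBit 0 := by
    simp [sN, rng8, htb]
  have h17 : (sN t).testBit 17 = (wN t 4).testBit 1 := by
    simp [sN, rng8, htb]
  have h18 : (sN t).testBit 18 = (wN t 4).testBit 2 := by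
    simp [sN, rng8, htb]
  have h19 : (sN t).testBit 19 = (wN t 4).testBit 3 := by
    simp [sN, rng8, htb]
  have h20 : (sN t).testBit 20 = (wN t 5).testBit 0 := by
    simp [sN, rng8, htb]
  have h21 : (sN t).testBit 21 = (wN t 5).testBit 1 := by
    simp [sN, rng8, htb]
  have h22 : (sN t).testBit 22 = (wN t 5).testBit 2 := by
    simp [sN, rng8, htb]
  have h23 : (sN t).testBit 23 = (wN t 5).testBit 3 := by
    simp [sN, rng8, htb]
  have h24 : (sN t).testBit 24 = (wN t 6).testBit 0 := by
    simp [sN, rng8, htb]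
  have h25 : (sN t).testBit 25 = (wN t 6).testBit 1 := by
    simp [sN, rng8, htb]
  have h26 : (sN t).testBit 26 = (wN t 6).testBit 2 := by
    simp [sN, rng8, htb]
  have h27 : (sN t).testBit 27 = (wN t 6).testBit 3 := by
    simp [sN, rng8, htb]
  have h28 : (sN t).testBit 28 = (wN t 7).testBit 0 := by
    simp [sN, rng8, htb]
  have h29 : (sN t).testBit 29 = (wN t 7).testBit 1 := by
    simp [sN, rng8, htb]
  have h30 : (sN t).testBit 30 = (wN t 7).testBit 2 := by
    simp [sN, rng8, htb]
  have h31 : (sN t).testBit 31 = (wN t 7).testBit 3 := by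
    simp [sN, rng8, htb]
  simp only [pN, bN, rng8, show List.range 32 = [0, 1, 2, 3, 4, 5, 6, 7, 8, 9, 10, 11, 12, 13, 14,
    15, 16, 17, 18, 19, 20, 21, 22, 23, 24, 25, 26, 27, 28, 29, 30, 31] from by decide,
    List.foldl_cons, List.foldl_nil, h0, h1, h2, h3, h4, h5, h6, h7, h8, h9, h10, h11, h12, h13, h14, h15, h16, h17, h18, h19, h20, h21, h22, h23, h24, h25, h26, h27, h28, h29, h30, h31]
  rw [chunk0, chunk1, chunk2, chunk3, chunk4, chunk5, chunk6, chunk7]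

-- ===== VERDICT (by name: the statement is the Claim_ definition above) =====
theorem function_F_lblock_spec : Claim_equal_function_F_lblock := by
  intro r_half round_key _
  unfold Spec_function_F_lblock
  rw [bridgeA, bridgeB, core]
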